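-- pv_equiv track=rewrite | github.com/GammA-su/v16 | src/eidolon_v16/bvps/enumerate.py | _depth_pairs
-- ===== SOURCE A (Python) =====
-- def _depth_pairs(depth: int) -> list[tuple[int, int]]:
--     pairs: list[tuple[int, int]] = []
--     for left_depth in range(depth):
--         for right_depth in range(depth):
--             if max(left_depth, right_depth) != depth - 1:
--                 continue
--             pairs.append((left_depth, right_depth))
--     return sorted(
--         pairs,
--         key=lambda pair: (
--             pair[0] + pair[1],
--             pair[0] != depth - 1,
--             pair[1] != depth - 1,
--             pair[0],
--             pair[1],
--         ),
--     )
-- ===== SOURCE B (Python) =====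
-- def _depth_pairs(depth: int) -> list[tuple[int, int]]:
--     # Directly emit the pairs in final sorted order: for each i < depth-1 the two
--     # pairs of sum depth-1+i ((depth-1) on the left first), then (depth-1, depth-1).
--     m = depth - 1
--     out: list[tuple[int, int]] = []
--     for i in range(m):
--         out.append((m, i))
--         out.append((i, m))
--     if depth > 0:
--         out.append((m, m))
--     return out
-- ===== Notes on version B (the rewrite author's own statement) =====
-- stated objective: faster
-- what changed: B emits the pairs directly in the sorted order (for each i < depth-1 the two pairs (depth-1,i),(i,depth-1), then (depth-1,depth-1)), replacing A's depth^2 nested scan plus sort with one O(depth) pass and no sort.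
import Mathlib
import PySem

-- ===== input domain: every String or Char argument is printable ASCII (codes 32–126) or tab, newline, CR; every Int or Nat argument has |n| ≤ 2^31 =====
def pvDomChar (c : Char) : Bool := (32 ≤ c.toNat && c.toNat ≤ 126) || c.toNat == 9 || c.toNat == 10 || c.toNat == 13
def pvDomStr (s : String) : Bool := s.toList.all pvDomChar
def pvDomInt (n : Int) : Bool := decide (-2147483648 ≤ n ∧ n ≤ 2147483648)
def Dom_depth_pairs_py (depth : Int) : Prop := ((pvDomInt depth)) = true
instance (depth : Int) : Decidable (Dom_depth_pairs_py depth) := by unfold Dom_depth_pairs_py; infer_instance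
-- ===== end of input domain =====

-- B replaces A's nested scan over depth×depth plus sort by directly emitting the
-- pairs in the final order in one pass over range(depth-1) (objective: faster).

-- ===== PORT A =====
-- the 5-component sort key of A's lambda, compared lexicographically as in Python
def pvKey (depth : Int) (p : Int × Int) :
    Lex (Int × Lex (Bool × Lex (Bool × Lex (Int × Int)))) :=
  toLex (p.1 + p.2, toLex (p.1 != depth - 1, toLex (p.2 != depth - 1, toLex (p.1, p.2))))

def depth_pairs_py (depth : Int) : List (Int × Int) :=
  let pairs : List (Int × Int) :=
    (PySem.List.pyRange 0 depth).foldl (fun pairs left_depth =>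
      (PySem.List.pyRange 0 depth).foldl (fun pairs right_depth =>
        if max left_depth right_depth ≠ depth - 1 then pairs
        else pairs ++ [(left_depth, right_depth)]) pairs) []
  PySem.List.sorted pairs (pvKey depth)

-- ===== PORT B =====
def depth_pairs_py_alt (depth : Int) : List (Int × Int) :=
  let m := depth - 1
  let out := (PySem.List.pyRange 0 m).foldl (fun out i => out ++ [(m, i), (i, m)]) []
  if depth > 0 then out ++ [(m, m)] else out

-- ===== PRECONDITION & SPEC =====
def Spec_depth_pairs_py (depth : Int) (out : List (Int × Int)) : Prop := out = depth_pairs_py_alt depth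
instance (depth : Int) (out : List (Int × Int)) : Decidable (Spec_depth_pairs_py depth out) := by unfold Spec_depth_pairs_py; infer_instance

-- ===== CLAIM (what is proved, stated in full; the proofs are below) =====
def Claim_equal_depth_pairs_py : Prop := ∀ (depth : Int), Dom_depth_pairs_py depth → Spec_depth_pairs_py depth (depth_pairs_py depth)

-- ===== LEMMAS AND PROOFS =====

-- A's generated (unsorted) pair list, as a flatMap of a filtered range
theorem pairsA_eq (depth : Int) :
    ((PySem.List.pyRange 0 depth).foldl (fun pairs left_depth =>
      (PySem.List.pyRange 0 depth).foldl (fun pairs right_depth =>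
        if max left_depth right_depth ≠ depth - 1 then pairs
        else pairs ++ [(left_depth, right_depth)]) pairs) []) =
    (PySem.List.pyRange 0 depth).flatMap (fun l =>
      ((PySem.List.pyRange 0 depth).filter (fun r => decide (max l r = depth - 1))).map
        (fun r => (l, r))) := by
  have hinner : ∀ (l : Int) (acc : List (Int × Int)),
      ((PySem.List.pyRange 0 depth).foldl (fun pairs right_depth =>
        if max l right_depth ≠ depth - 1 then pairs
        else pairs ++ [(l, right_depth)]) acc) =
      acc ++ ((PySem.List.pyRange 0 depth).filter
        (fun r => decide (max l r = depth - 1))).map (fun r => (l, r)) := by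
    intro l acc
    have h := PySem.List.foldl_append_ite (fun r => max l r = depth - 1)
      (fun r => (l, r)) (PySem.List.pyRange 0 depth) acc
    rw [← h]
    apply PySem.List.foldl_congr_mem
    intro a b _; by_cases hc : max l b = depth - 1 <;> simp [hc]
  rw [PySem.List.foldl_congr_mem _ _
    (fun pairs l => pairs ++ ((PySem.List.pyRange 0 depth).filter
      (fun r => decide (max l r = depth - 1))).map (fun r => (l, r))) []
    (fun acc x _ => hinner x acc)]
  rw [PySem.List.foldl_append_eq_flatMap]; simp

theorem depth_pairs_nonpos (depth : Int) (h : depth ≤ 0) :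
    depth_pairs_py depth = depth_pairs_py_alt depth := by
  have h1 : PySem.List.pyRange 0 depth = [] := by
    simp [PySem.List.pyRange_one]; omega
  have h2 : PySem.List.pyRange 0 (depth - 1) = [] := by
    simp [PySem.List.pyRange_one]; omega
  simp [depth_pairs_py, depth_pairs_py_alt, h1, h2, not_lt.mpr h, PySem.List.sorted]

-- the two emitted families, for m = depth - 1 = k
def pvF (k : Nat) (i : Nat) : Int × Int := ((k : Int), (i : Int))   -- (m, i)
def pvG (k : Nat) (i : Nat) : Int × Int := ((i : Int), (k : Int))   -- (i, m)

theorem pvKey_lt_first {d : Int} {p q : Int × Int} (h : p.1 + p.2 < q.1 + q.2) :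
    pvKey d p < pvKey d q := by
  simp [pvKey, Prod.Lex.lt_iff]; omega

theorem pvKey_fg_lt {k i : Nat} (hik : i < k) (d : Int) (hd : d - 1 = (k : Int)) :
    pvKey d (pvF k i) < pvKey d (pvG k i) := by
  have h1 : ((k:Int) != d - 1) = false := by simp [hd]
  have h2 : ((i:Int) != d - 1) = true := by rw [hd]; simp [bne]; omega
  simp [pvKey, pvF, pvG, h1, h2, Prod.Lex.lt_iff]
  omega

-- members of the interleaved prefix
theorem chain_mem {k n : Nat} {p : Int × Int}
    (hp : p ∈ (List.range n).flatMap (fun i => [pvF k i, pvG k i])) :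
    ∃ i, i < n ∧ (p = pvF k i ∨ p = pvG k i) := by
  simp only [List.mem_flatMap, List.mem_range] at hp
  obtain ⟨i, hi, hmem⟩ := hp
  simp only [List.mem_cons, List.not_mem_nil, or_false] at hmem
  exact ⟨i, hi, by tauto⟩

theorem chain_pairwise (k : Nat) (d : Int) (hd : d - 1 = (k : Int)) :
    ∀ n, n ≤ k →
      (((List.range n).flatMap (fun i => [pvF k i, pvG k i])) ++ [pvF k k]).Pairwise
        (fun a b => pvKey d a < pvKey d b) := by
  intro n
  induction n with
  | zero => intro _; simp
  | succ n ih =>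
    intro hn
    have hnk : n < k := hn
    rw [List.range_succ, List.flatMap_append, List.append_assoc]
    apply List.pairwise_append.mpr
    refine ⟨(List.pairwise_append.mp (ih (by omega))).1, ?_, ?_⟩
    · -- [pvF k n, pvG k n] ++ [pvF k k] is pairwise increasing
      simp only [List.flatMap_cons, List.flatMap_nil, List.append_nil]
      refine List.pairwise_append.mpr ⟨?_, by simp, ?_⟩
      · refine List.Pairwise.cons ?_ (List.pairwise_singleton _ _)
        intro b hb
        rw [List.mem_singleton.mp hb]
        exact pvKey_fg_lt hnk d hd
      · intro a ha b hb
        simp only [List.mem_cons, List.not_mem_nil, or_false] at ha hb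
        subst hb
        rcases ha with rfl | rfl <;>
          exact pvKey_lt_first (by simp [pvF, pvG]; omega)
    · intro a ha b hb
      obtain ⟨i, hi, hcase⟩ := chain_mem ha
      simp only [List.flatMap_cons, List.flatMap_nil, List.append_nil, List.mem_append,
        List.mem_cons, List.not_mem_nil, or_false] at hb
      have hsum_a : a.1 + a.2 = (k : Int) + (i : Int) := by
        rcases hcase with rfl | rfl <;> (simp [pvF, pvG]; try ring)
      have hsum_b : (k : Int) + (n : Int) ≤ b.1 + b.2 := by
        rcases hb with (rfl | rfl) | rfl <;> simp [pvF, pvG] <;> omega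
      exact pvKey_lt_first (by omega)

theorem pv_shuffle {α : Type} (a b : List α) (x y : α) :
    ((a ++ b) ++ [x, y] : List α).Perm ((a ++ [y]) ++ (b ++ [x])) := by
  rw [← Multiset.coe_eq_coe]
  simp only [← Multiset.coe_add]
  show ((a:Multiset α) + b) + ↑[x,y] = ((a:Multiset α) + ↑[y]) + (↑b + ↑[x])
  have h : ((([x,y]:List α)):Multiset α) = ↑([x]:List α) + ↑([y]:List α) := by rfl
  rw [h]; abel

theorem chain_perm_aux {α : Type} (f g : Nat → α) (n : Nat) :
    ((List.range n).flatMap (fun i => [f i, g i])).Perm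
      ((List.range n).map g ++ (List.range n).map f) := by
  induction n with
  | zero => simp
  | succ n ih =>
    rw [List.range_succ, List.flatMap_append, List.map_append, List.map_append]
    simp only [List.flatMap_cons, List.flatMap_nil, List.append_nil, List.map_cons,
      List.map_nil]
    exact (ih.append_right [f n, g n]).trans (pv_shuffle _ _ (f n) (g n))

-- the inner filtered list, for a left index below depth-1 and at depth-1
theorem filter_lt (k l : Nat) (hl : l < k) :
    ((PySem.List.pyRange 0 ((k:Int)+1)).filter
        (fun r => decide (max (l:Int) r = ((k:Int)+1) - 1))).map
      (fun r => ((l:Int), r)) = [pvG k l] := by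
  rw [show ((k:Int)+1) = ((k + 1 : Nat) : Int) by push_cast; ring,
    PySem.List.pyRange_zero_natCast, List.filter_map, List.range_succ, List.filter_append]
  simp only [Function.comp_def]
  have h1 : (List.range k).filter (fun r => decide (max (l:Int) ((r:Nat):Int) = ((k+1:Nat):Int) - 1)) = [] := by
    apply List.filter_eq_nil_iff.mpr
    intro r hr
    simp only [List.mem_range] at hr
    simp only [decide_eq_true_eq]
    push_cast; omega
  have h2 : ([k]).filter (fun r => decide (max (l:Int) ((r:Nat):Int) = ((k+1:Nat):Int) - 1)) = [k] := by
    simp only [List.filter_cons, List.filter_nil, decide_eq_true_eq]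
    rw [if_pos (by push_cast; omega)]
  rw [h1, h2]
  simp [pvG]

theorem filter_eq (k : Nat) :
    ((PySem.List.pyRange 0 ((k:Int)+1)).filter
        (fun r => decide (max (k:Int) r = ((k:Int)+1) - 1))).map
      (fun r => ((k:Int), r)) = (List.range k).map (fun i => pvF k i) ++ [pvF k k] := by
  rw [show ((k:Int)+1) = ((k + 1 : Nat) : Int) by push_cast; ring,
    PySem.List.pyRange_zero_natCast, List.filter_map]
  simp only [Function.comp_def]
  have h1 : (List.range (k+1)).filter (fun r => decide (max (k:Int) ((r:Nat):Int) = ((k+1:Nat):Int) - 1)) = List.range (k+1) := by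
    apply List.filter_eq_self.mpr
    intro r hr
    simp only [List.mem_range] at hr
    simp only [decide_eq_true_eq]
    push_cast; omega
  rw [h1, List.range_succ, List.map_append]
  simp [pvF, List.map_map, Function.comp_def]

theorem depth_pairs_pos (k : Nat) :
    depth_pairs_py ((k:Int) + 1) = depth_pairs_py_alt ((k:Int) + 1) := by
  have hd : ((k:Int) + 1) - 1 = (k:Int) := by omega
  -- B's side: the interleaved chain followed by (m, m)
  have hB : depth_pairs_py_alt ((k:Int) + 1) =
      ((List.range k).flatMap (fun i => [pvF k i, pvG k i])) ++ [pvF k k] := by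
    unfold depth_pairs_py_alt
    simp only [hd]
    rw [if_pos (by omega)]
    rw [PySem.List.pyRange_zero_natCast, PySem.List.foldl_append_eq_flatMap,
      List.flatMap_map]
    simp [pvF, pvG]
  -- A's generated list, evaluated
  have hA : ((PySem.List.pyRange 0 ((k:Int)+1)).flatMap (fun l =>
        ((PySem.List.pyRange 0 ((k:Int)+1)).filter
          (fun r => decide (max l r = ((k:Int)+1) - 1))).map (fun r => (l, r)))) =
      (List.range k).map (fun i => pvG k i) ++
        ((List.range k).map (fun i => pvF k i) ++ [pvF k k]) := by
    set inner : Int → List (Int × Int) := fun l =>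
      ((PySem.List.pyRange 0 ((k:Int)+1)).filter
        (fun r => decide (max l r = ((k:Int)+1) - 1))).map (fun r => (l, r)) with hI
    rw [show PySem.List.pyRange 0 ((k:Int)+1) = (List.range (k+1)).map (fun r => ((r:Nat):Int)) by
      rw [show ((k:Int)+1) = ((k + 1 : Nat) : Int) by push_cast; ring]
      exact PySem.List.pyRange_zero_natCast (k+1)]
    rw [List.flatMap_map, List.range_succ, List.flatMap_append]
    congr 1
    · rw [show (List.range k).map (fun i => pvG k i) =
          (List.range k).flatMap (fun i => [pvG k i]) from List.map_eq_flatMap]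
      apply List.flatMap_congr
      intro l hl
      simp only [List.mem_range] at hl
      simp only [hI]
      exact filter_lt k l hl
    · simp only [List.flatMap_cons, List.flatMap_nil, List.append_nil, hI]
      exact filter_eq k
  unfold depth_pairs_py
  rw [pairsA_eq, hA, hB]
  apply PySem.List.sorted_eq_of_perm_of_pairwise_lt
  · have h := (chain_perm_aux (pvF k) (pvG k) k).append_right [pvF k k]
    exact h.trans (by rw [List.append_assoc])
  · exact chain_pairwise k ((k:Int)+1) hd k le_rfl

-- ===== VERDICT (by name: the statement is the Claim_ definition above) =====
theorem depth_pairs_py_spec : Claim_equal_depth_pairs_py := by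
  intro depth _
  unfold Spec_depth_pairs_py
  by_cases h : depth ≤ 0
  · exact depth_pairs_nonpos depth h
  · have hdepth : depth = ((depth - 1).toNat : Int) + 1 := by omega
    rw [hdepth]; exact depth_pairs_pos (depth - 1).toNat
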